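-- pv_equiv track=rewrite | github.com/eholle123/advent-of-code-2023 | day14/part1.py | roll_rocks_by_col
-- ===== SOURCE A (Python) =====
-- def roll_rocks_by_col(row: str) -> str:
--     if "#" in row:
--         cube_rocks = row.count("#")
--         row_splices = row.split("#")
--         if row_splices[-1] == "":
--             el = row_splices.pop()
--         rolled_row = ""
--         count_cubes = 0
--         for row_splice in row_splices:
--             rolled_row = rolled_row + get_rolled(row_splice)
--             if count_cubes < cube_rocks:
--                 rolled_row = rolled_row + "#"
--                 count_cubes += 1
--     else:
--         rolled_row = get_rolled(row)
--     return rolled_row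
--
-- def get_rolled(row_splice: str) -> str:
--     rolled = ""
--     round_rocks = len([n for n in row_splice if n != "."])
--     rolled = ("0" * round_rocks) + ("." * (len(row_splice) - round_rocks))
--     # ic(rolled)
--     return rolled
-- ===== SOURCE B (Python) =====
-- def roll_rocks_by_col(row: str) -> str:
--     # Single left-to-right scan: count rocks/length of the current segment,
--     # flush "0"*rocks + "."*(length-rocks) on each "#" and once at the end.
--     out = []
--     rocks = 0
--     length = 0
--     for ch in row:
--         if ch == "#":
--             out.append("0" * rocks + "." * (length - rocks) + "#")
--             rocks = 0
--             length = 0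
--         elif ch == ".":
--             length += 1
--         else:
--             rocks += 1
--             length += 1
--     out.append("0" * rocks + "." * (length - rocks))
--     return "".join(out)
-- ===== Notes on version B (the rewrite author's own statement) =====
-- stated objective: alternative
-- what changed: Replaced A's count/split('#')/pop-trailing-empty/loop-over-splices pipeline by a single left-to-right scan that keeps rock and length counters for the current segment and flushes '0'*rocks+'.'*(length-rocks) at each '#' and once at the end.
import Mathlib
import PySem

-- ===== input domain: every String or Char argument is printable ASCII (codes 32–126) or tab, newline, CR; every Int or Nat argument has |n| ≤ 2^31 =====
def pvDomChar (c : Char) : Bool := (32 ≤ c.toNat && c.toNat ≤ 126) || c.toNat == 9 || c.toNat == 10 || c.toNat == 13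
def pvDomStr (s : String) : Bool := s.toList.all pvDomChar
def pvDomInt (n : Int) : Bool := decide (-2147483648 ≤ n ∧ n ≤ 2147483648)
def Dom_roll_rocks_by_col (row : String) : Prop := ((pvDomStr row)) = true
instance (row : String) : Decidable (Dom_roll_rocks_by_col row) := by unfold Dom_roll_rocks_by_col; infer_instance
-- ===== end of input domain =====

-- B replaces A's count/split/pop/loop-over-splices pipeline by one left-to-right scan with
-- two counters flushed at each '#' and at the end (objective: alternative single-pass decomposition).

-- ===== PORT A =====
def get_rolled (row_splice : List Char) : List Char :=
  let round_rocks := (row_splice.filter (fun n => n != '.')).length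
  List.replicate round_rocks '0' ++ List.replicate (row_splice.length - round_rocks) '.'

def rollA_loop (cube_rocks : Nat) (st : List Char × Nat) (row_splice : List Char) : List Char × Nat :=
  let rolled_row := st.1 ++ get_rolled row_splice
  if st.2 < cube_rocks then (rolled_row ++ ['#'], st.2 + 1) else (rolled_row, st.2)

def roll_rocks_by_col (row : String) : String :=
  let cs := row.toList
  if PySem.Chars.isIn ['#'] cs then
    let cube_rocks := PySem.Chars.count cs ['#']
    let row_splices := PySem.Chars.splitOn cs ['#']
    let row_splices := if PySem.List.pyGet? row_splices (-1) = some [] then row_splices.dropLast else row_splices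
    String.ofList (row_splices.foldl (rollA_loop cube_rocks) ([], 0)).1
  else String.ofList (get_rolled cs)

-- ===== PORT B =====
def rollB_step (st : List (List Char) × Nat × Nat) (ch : Char) : List (List Char) × Nat × Nat :=
  if ch = '#' then
    (st.1 ++ [List.replicate st.2.1 '0' ++ List.replicate (st.2.2 - st.2.1) '.' ++ ['#']], 0, 0)
  else if ch = '.' then (st.1, st.2.1, st.2.2 + 1)
  else (st.1, st.2.1 + 1, st.2.2 + 1)

def roll_rocks_by_col_alt (row : String) : String :=
  let st := row.toList.foldl rollB_step ([], 0, 0)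
  String.ofList (PySem.Chars.join []
    (st.1 ++ [List.replicate st.2.1 '0' ++ List.replicate (st.2.2 - st.2.1) '.']))

-- ===== PRECONDITION & SPEC =====
def Spec_roll_rocks_by_col (row : String) (out : String) : Prop := out = roll_rocks_by_col_alt row
instance (row : String) (out : String) : Decidable (Spec_roll_rocks_by_col row out) := by unfold Spec_roll_rocks_by_col; infer_instance

-- ===== CLAIM (what is proved, stated in full; the proofs are below) =====
def Claim_equal_roll_rocks_by_col : Prop := ∀ (row : String), Dom_roll_rocks_by_col row → Spec_roll_rocks_by_col row (roll_rocks_by_col row)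

-- ===== LEMMAS AND PROOFS =====

/-- Reference form of a rolled segment, by its rock count and length. -/
def rollRN (r n : Nat) : List Char := List.replicate r '0' ++ List.replicate (n - r) '.'

/-- Structural form of `splitOn cs ['#']` with an accumulated (reversed) current segment. -/
def mySplit : List Char → List Char → List (List Char)
  | [], cur => [cur.reverse]
  | c :: t, cur => if c = '#' then cur.reverse :: mySplit t [] else mySplit t (c :: cur)

/-- Recursive form of B's scan. -/
def S : List Char → Nat → Nat → List Char
  | [], r, n => rollRN r n
  | c :: t, r, n =>
    if c = '#' then rollRN r n ++ '#' :: S t 0 0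
    else if c = '.' then S t r (n + 1) else S t (r + 1) (n + 1)

/-- Common target: segments rolled and joined with '#'. -/
def glue (segs : List (List Char)) : List Char := PySem.Chars.join ['#'] (segs.map get_rolled)

/-- Recursive form of A's fold over the splices. -/
def Afold (k : Nat) : List (List Char) → Nat → List Char
  | [], _ => []
  | sp :: rest, cnt =>
    get_rolled sp ++ (if cnt < k then '#' :: Afold k rest (cnt + 1) else Afold k rest cnt)

theorem get_rolled_eq (sp : List Char) :
    get_rolled sp = rollRN (sp.countP (fun n => n != '.')) sp.length := by
  simp [get_rolled, rollRN, List.countP_eq_length_filter]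

theorem splitOn_go_eq : ∀ (fuel : Nat) (cs cur : List Char) (acc : List (List Char)),
    cs.length < fuel →
    PySem.Chars.splitOn.go ['#'] fuel cs cur acc = acc.reverse ++ mySplit cs cur := by
  intro fuel
  induction fuel with
  | zero => intro cs cur acc h; omega
  | succ fuel ih =>
    intro cs cur acc h
    cases cs with
    | nil => simp [PySem.Chars.splitOn.go, mySplit]
    | cons c t =>
      by_cases hc : c = '#'
      · subst hc
        rw [show PySem.Chars.splitOn.go ['#'] (fuel + 1) ('#' :: t) cur acc
              = PySem.Chars.splitOn.go ['#'] fuel t [] (cur.reverse :: acc) by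
            simp [PySem.Chars.splitOn.go, List.isPrefixOf]]
        rw [ih t [] (cur.reverse :: acc) (by simpa using Nat.lt_of_succ_lt_succ h)]
        simp [mySplit]
      · rw [show PySem.Chars.splitOn.go ['#'] (fuel + 1) (c :: t) cur acc
              = PySem.Chars.splitOn.go ['#'] fuel t (c :: cur) acc by
            simp [PySem.Chars.splitOn.go, List.isPrefixOf, (by simpa using Ne.symm hc : ('#' == c) = false)]]
        rw [ih t (c :: cur) acc (by simpa using Nat.lt_of_succ_lt_succ h)]
        simp [mySplit, hc]

theorem splitOn_eq (cs : List Char) : PySem.Chars.splitOn cs ['#'] = mySplit cs [] := by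
  simpa using splitOn_go_eq (cs.length + 1) cs [] [] (by omega)

theorem count_go_eq : ∀ (fuel : Nat) (cs : List Char) (acc : Nat),
    cs.length ≤ fuel →
    PySem.Chars.count.go ['#'] fuel cs acc = acc + cs.count '#' := by
  intro fuel
  induction fuel with
  | zero =>
    intro cs acc h
    have : cs = [] := List.eq_nil_of_length_eq_zero (by omega)
    subst this
    simp [PySem.Chars.count.go]
  | succ fuel ih =>
    intro cs acc h
    cases cs with
    | nil => simp [PySem.Chars.count.go]
    | cons c t =>
      by_cases hc : c = '#'
      · subst hc
        rw [show PySem.Chars.count.go ['#'] (fuel + 1) ('#' :: t) acc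
              = PySem.Chars.count.go ['#'] fuel t (acc + 1) by
            simp [PySem.Chars.count.go, List.isPrefixOf]]
        rw [ih t (acc + 1) (by simpa using Nat.le_of_succ_le_succ h)]
        simp
        omega
      · rw [show PySem.Chars.count.go ['#'] (fuel + 1) (c :: t) acc
              = PySem.Chars.count.go ['#'] fuel t acc by
            simp [PySem.Chars.count.go, List.isPrefixOf, (by simpa using Ne.symm hc : ('#' == c) = false)]]
        rw [ih t acc (by simpa using Nat.le_of_succ_le_succ h)]
        simp [hc]

theorem count_eq_count (cs : List Char) : PySem.Chars.count cs ['#'] = cs.count '#' := by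
  simpa [PySem.Chars.count] using count_go_eq cs.length cs 0 (le_refl _)

theorem isIn_hash (cs : List Char) : PySem.Chars.isIn ['#'] cs = true ↔ '#' ∈ cs := by
  rw [PySem.Chars.isIn_iff_infix]
  constructor
  · rintro ⟨p, s, rfl⟩; simp
  · intro h
    obtain ⟨p, s, h⟩ := List.append_of_mem h
    exact ⟨p, s, by simp [h]⟩

theorem mySplit_ne_nil (cs cur : List Char) : mySplit cs cur ≠ [] := by
  induction cs generalizing cur with
  | nil => simp [mySplit]
  | cons c t ih =>
    simp only [mySplit]
    split
    · simp
    · exact ih _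

theorem mySplit_length (cs : List Char) : ∀ cur, (mySplit cs cur).length = cs.count '#' + 1 := by
  induction cs with
  | nil => intro cur; simp [mySplit]
  | cons c t ih =>
    intro cur
    by_cases hc : c = '#'
    · subst hc; simp [mySplit, ih]
    · simp [mySplit, hc, ih]

theorem mySplit_no_hash : ∀ (cs cur : List Char), '#' ∉ cs → mySplit cs cur = [cur.reverse ++ cs] := by
  intro cs
  induction cs with
  | nil => intro cur _; simp [mySplit]
  | cons c t ih =>
    intro cur h
    have hc : ¬ c = '#' := fun hcc => h (hcc ▸ List.mem_cons_self)
    have ht : '#' ∉ t := fun hm => h (List.mem_cons_of_mem _ hm)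
    simp [mySplit, hc, ih _ ht]

theorem glue_singleton (x : List Char) : glue [x] = get_rolled x := by
  simp [glue, PySem.Chars.join, List.intercalate]

theorem glue_cons (x : List Char) (ys : List (List Char)) (h : ys ≠ []) :
    glue (x :: ys) = get_rolled x ++ '#' :: glue ys := by
  obtain ⟨y, ys', rfl⟩ := List.exists_cons_of_ne_nil h
  simp [glue, PySem.Chars.join, List.intercalate]

theorem S_glue (cs : List Char) : ∀ cur,
    S cs (cur.countP (fun n => n != '.')) cur.length = glue (mySplit cs cur) := by
  induction cs with
  | nil =>
    intro cur
    simp [S, mySplit, glue_singleton, get_rolled_eq, List.countP_reverse]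
  | cons c t ih =>
    intro cur
    simp only [S, mySplit]
    by_cases hc : c = '#'
    · simp only [hc, if_true]
      rw [glue_cons _ _ (mySplit_ne_nil t [])]
      have h0 := ih []
      simp only [List.countP_nil, List.length_nil] at h0
      rw [h0, get_rolled_eq]
      simp [List.countP_reverse]
    · by_cases hd : c = '.'
      · subst hd
        have h1 := ih ('.' :: cur)
        simp only [List.countP_cons, List.length_cons] at h1
        simpa [hc] using h1
      · have h1 := ih (c :: cur)
        simp only [List.countP_cons, List.length_cons] at h1
        simpa [hc, hd] using h1

theorem join_nil_eq_flatten : ∀ (xs : List (List Char)), PySem.Chars.join [] xs = xs.flatten := by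
  intro xs
  induction xs with
  | nil => simp [PySem.Chars.join, List.intercalate]
  | cons x ys ih =>
    cases ys with
    | nil => simp [PySem.Chars.join, List.intercalate]
    | cons y ys' =>
      simp only [PySem.Chars.join, List.intercalate, List.intersperse] at ih ⊢
      simp [ih]

theorem B_fold_eq (cs : List Char) : ∀ (out : List (List Char)) (r n : Nat),
    ((cs.foldl rollB_step (out, r, n)).1 ++
      [rollRN (cs.foldl rollB_step (out, r, n)).2.1 (cs.foldl rollB_step (out, r, n)).2.2]).flatten
      = out.flatten ++ S cs r n := by
  induction cs with
  | nil => intro out r n; simp [S, rollRN]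
  | cons c t ih =>
    intro out r n
    simp only [List.foldl_cons]
    by_cases hc : c = '#'
    · simp only [rollB_step, hc]
      rw [ih]
      simp [S, rollRN, List.append_assoc]
    · by_cases hd : c = '.'
      · simp only [rollB_step, hd]
        rw [ih]
        simp [S]
      · simp only [rollB_step, hc, hd]
        rw [ih]
        simp [S, hc, hd]

theorem A_fold_eq (k : Nat) (segs : List (List Char)) : ∀ (acc : List Char) (cnt : Nat),
    (segs.foldl (rollA_loop k) (acc, cnt)).1 = acc ++ Afold k segs cnt := by
  induction segs with
  | nil => intro acc cnt; simp [Afold]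
  | cons sp rest ih =>
    intro acc cnt
    simp only [List.foldl_cons, rollA_loop, Afold]
    by_cases h : cnt < k
    · simp only [if_pos h]
      rw [ih]
      simp [List.append_assoc]
    · simp only [if_neg h]
      rw [ih]
      simp [List.append_assoc]

theorem Afold_all (k : Nat) (segs : List (List Char)) : ∀ cnt, cnt + segs.length ≤ k →
    Afold k segs cnt = (segs.map (fun sp => get_rolled sp ++ ['#'])).flatten := by
  induction segs with
  | nil => intro cnt _; simp [Afold]
  | cons sp rest ih =>
    intro cnt h
    simp only [List.length_cons] at h
    simp only [Afold]
    rw [if_pos (by omega), ih (cnt + 1) (by omega)]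
    simp [List.append_assoc]

theorem Afold_glue (k : Nat) (segs : List (List Char)) : ∀ cnt, cnt + segs.length = k + 1 →
    Afold k segs cnt = glue segs := by
  induction segs with
  | nil => intro cnt _; simp [Afold, glue, PySem.Chars.join, List.intercalate]
  | cons sp rest ih =>
    intro cnt h
    simp only [List.length_cons] at h
    cases rest with
    | nil =>
      simp only [List.length_nil] at h
      simp only [Afold]
      rw [if_neg (by omega)]
      simp [glue_singleton]
    | cons y ys =>
      have hih := ih (cnt + 1) (by simp at h ⊢; omega)
      rw [glue_cons _ _ (by simp)]
      simp only [Afold] at hih ⊢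
      rw [if_pos (by simp at h; omega), hih]

theorem glue_concat_nil : ∀ (init : List (List Char)),
    glue (init ++ [[]]) = (init.map (fun sp => get_rolled sp ++ ['#'])).flatten := by
  intro init
  induction init with
  | nil => simp [glue, get_rolled, PySem.Chars.join, List.intercalate]
  | cons x xs ih =>
    rw [List.cons_append, glue_cons _ _ (by simp), ih]
    simp [List.append_assoc]

theorem pyGet_neg_one_concat (init : List (List Char)) (lst : List Char) :
    PySem.List.pyGet? (init ++ [lst]) (-1) = some lst := by
  simp [PySem.List.pyGet?, PySem.List.pyIdx?]

theorem alt_eq_S (row : String) : roll_rocks_by_col_alt row = String.ofList (S row.toList 0 0) := by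
  have h := B_fold_eq row.toList [] 0 0
  simp only [List.flatten_nil, List.nil_append] at h
  simp only [roll_rocks_by_col_alt]
  rw [join_nil_eq_flatten]
  exact congrArg String.ofList h

-- ===== VERDICT (by name: the statement is the Claim_ definition above) =====
theorem roll_rocks_by_col_spec : Claim_equal_roll_rocks_by_col := by
  intro row _
  unfold Spec_roll_rocks_by_col
  rw [alt_eq_S]
  have hS : S row.toList 0 0 = glue (mySplit row.toList []) := by
    simpa using S_glue row.toList []
  unfold roll_rocks_by_col
  by_cases hin : PySem.Chars.isIn ['#'] row.toList = true
  · simp only [hin, if_true]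
    have hmem : '#' ∈ row.toList := (isIn_hash _).1 hin
    set cs := row.toList with hcs
    set segs := mySplit cs [] with hsegs
    have hne : segs ≠ [] := mySplit_ne_nil _ _
    have hk : PySem.Chars.count cs ['#'] = cs.count '#' := count_eq_count cs
    set k := cs.count '#' with hkk
    have hlen : segs.length = k + 1 := mySplit_length cs []
    obtain ⟨init, lst, hil⟩ : ∃ init lst, segs = init ++ [lst] :=
      ⟨segs.dropLast, segs.getLast hne, (List.dropLast_concat_getLast hne).symm⟩
    have hget : PySem.List.pyGet? segs (-1) = some lst := by
      rw [hil]; exact pyGet_neg_one_concat init lst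
    rw [splitOn_eq, ← hsegs, hk]
    by_cases hl : lst = []
    · rw [if_pos (by rw [hget, hl])]
      have hinitlen : init.length = k := by
        rw [hil] at hlen; simp at hlen; omega
      rw [hil, List.dropLast_concat]
      rw [A_fold_eq, Afold_all k init 0 (by omega)]
      rw [hS, hil, hl, glue_concat_nil]
      simp
    · rw [if_neg (by rw [hget]; simp [hl])]
      rw [A_fold_eq, Afold_glue k segs 0 (by omega)]
      rw [hS]
      simp
  · simp only [hin, if_false, Bool.false_eq_true]
    have hmem : '#' ∉ row.toList := fun h => hin ((isIn_hash _).2 h)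
    rw [hS, mySplit_no_hash _ [] hmem]
    simp [glue_singleton]
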